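-- pv_equiv track=rewrite | github.com/chenye95/LeetCode_Progress | 966_VowelSpellChecker.py | vowel_spellchecker
-- ===== SOURCE A (Python) =====
-- from typing import List
--
-- def vowel_spellchecker(word_list: List[str], queries: List[str]) -> List[str]:
--     """
--     :param word_list: a list of string to match to
--     :param queries: list of words to match against
--     :return: closest match for each query_word in queries
--     """
--
--     def de_vowel(word_pre_lower: str) -> str:
--         """
--         :return: replace vowels e i o u with letter a
--         """
--         return word_pre_lower.replace('e', 'a').replace('i', 'a').replace('o', 'a').replace('u', 'a')
--
--     def solve_query(query_word: str) -> str: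
--         """
--         :return: closest match in word_list for query_word
--         """
--         if query_word in word_perfect_match:
--             return query_word
--
--         query_word_lower = query_word.lower()
--         if query_word_lower in word_capitalization:
--             return word_capitalization[query_word_lower]
--
--         return word_vowel.get(de_vowel(query_word_lower), "")
--
--     word_perfect_match = set(word_list)
--     word_capitalization = dict()
--     word_vowel = dict()
--
--     for word in word_list:
--         word_lower = word.lower()
--         word_capitalization.setdefault(word_lower, word)
--         word_vowel.setdefault(de_vowel(word_lower), word)
--
--     return list(map(solve_query, queries))
-- ===== SOURCE B (Python) =====
-- from typing import List
--
-- def vowel_spellchecker(word_list: List[str], queries: List[str]) -> List[str]: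
--     """Index-free re-implementation: answer each query by direct scans of
--     word_list, one tier at a time (exact, then case-insensitive, then
--     devoweled), always returning the earliest matching word."""
--
--     def de_vowel(word_pre_lower: str) -> str:
--         return word_pre_lower.replace('e', 'a').replace('i', 'a').replace('o', 'a').replace('u', 'a')
--
--     def match(query: str) -> str:
--         if any(w == query for w in word_list):
--             return query
--         ql = query.lower()
--         for w in word_list:
--             if w.lower() == ql:
--                 return w
--         qd = de_vowel(ql)
--         for w in word_list:
--             if de_vowel(w.lower()) == qd:
--                 return w
--         return ""
--
--     return [match(q) for q in queries]
-- ===== Notes on version B (the rewrite author's own statement) =====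
-- stated objective: simpler
-- what changed: Replaced A's precomputed set and two setdefault-built dictionaries with direct per-query linear scans of word_list, one tier at a time (exact, lowercase, devoweled), returning the first matching word.
import Mathlib
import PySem

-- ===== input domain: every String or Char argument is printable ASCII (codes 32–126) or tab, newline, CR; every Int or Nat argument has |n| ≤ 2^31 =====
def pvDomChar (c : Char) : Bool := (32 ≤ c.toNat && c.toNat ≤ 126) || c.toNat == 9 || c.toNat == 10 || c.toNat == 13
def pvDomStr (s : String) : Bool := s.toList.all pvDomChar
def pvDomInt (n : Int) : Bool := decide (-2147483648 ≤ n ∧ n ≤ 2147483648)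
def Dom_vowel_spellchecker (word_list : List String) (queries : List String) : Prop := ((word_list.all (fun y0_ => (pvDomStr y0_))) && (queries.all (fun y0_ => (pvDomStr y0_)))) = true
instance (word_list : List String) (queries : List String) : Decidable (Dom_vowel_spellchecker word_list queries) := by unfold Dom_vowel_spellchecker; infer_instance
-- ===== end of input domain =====

-- B answers each query by direct per-tier linear scans of word_list instead of A's
-- precomputed set and setdefault-built dictionaries; same return value, simpler code.


-- ===== PORT A =====
-- de_vowel: chained single-character replaces, exactly as in the Python (shared by both ports)
def deVowel (word_pre_lower : String) : String :=
  PySem.Str.replace (PySem.Str.replace (PySem.Str.replace (PySem.Str.replace word_pre_lower "e" "a") "i" "a") "o" "a") "u" "a"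

def vowel_spellchecker (word_list : List String) (queries : List String) : List String :=
  let word_perfect_match : PySem.Set String := PySem.Set.ofList word_list
  -- A's single loop over word_list builds both dicts; ported as one foldl over the pair
  let dicts := word_list.foldl
    (fun (p : PySem.Dict String String × PySem.Dict String String) word =>
      let word_lower := PySem.Str.lower word
      (p.1.setdefault word_lower word, p.2.setdefault (deVowel word_lower) word))
    (PySem.Dict.empty, PySem.Dict.empty)
  let word_capitalization := dicts.1
  let word_vowel := dicts.2
  let solve_query := fun (query_word : String) =>
    if PySem.Set.contains word_perfect_match query_word then query_word
    else
      let query_word_lower := PySem.Str.lower query_word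
      match word_capitalization.get? query_word_lower with
      | some w => w
      | none => word_vowel.getD (deVowel query_word_lower) ""
  queries.map solve_query

-- ===== PORT B =====
def vowel_spellchecker_alt (word_list : List String) (queries : List String) : List String :=
  let matchQ := fun (query : String) =>
    if word_list.any (fun w => w == query) then query
    else
      let ql := PySem.Str.lower query
      match word_list.find? (fun w => PySem.Str.lower w == ql) with
      | some w => w
      | none =>
        let qd := deVowel ql
        (word_list.find? (fun w => deVowel (PySem.Str.lower w) == qd)).getD ""
  queries.map matchQ

-- ===== PRECONDITION & SPEC =====
def Spec_vowel_spellchecker (word_list : List String) (queries : List String) (out : List String) : Prop := out = vowel_spellchecker_alt word_list queries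
instance (word_list : List String) (queries : List String) (out : List String) : Decidable (Spec_vowel_spellchecker word_list queries out) := by unfold Spec_vowel_spellchecker; infer_instance

-- ===== CLAIM (what is proved, stated in full; the proofs are below) =====
def Claim_equal_vowel_spellchecker : Prop := ∀ (word_list : List String) (queries : List String), Dom_vowel_spellchecker word_list queries → Spec_vowel_spellchecker word_list queries (vowel_spellchecker word_list queries)

-- ===== LEMMAS AND PROOFS =====

-- a foldl over a pair of independently updated components splits into two foldls
theorem foldl_prod_split {α β γ : Type} (g1 : α → γ → α) (g2 : β → γ → β)
    (l : List γ) (a : α) (b : β) :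
    l.foldl (fun p x => (g1 p.1 x, g2 p.2 x)) (a, b) = (l.foldl g1 a, l.foldl g2 b) := by
  induction l generalizing a b with
  | nil => rfl
  | cons x t ih => simp [List.foldl_cons, ih]

-- lookup in a setdefault-built dict is first-match search, keyed through f
theorem get?_foldl_setdefault (f : String → String) (l : List String)
    (d : PySem.Dict String String) (k : String) :
    (l.foldl (fun d w => d.setdefault (f w) w) d).get? k
      = (d.get? k).or (l.find? (fun w => f w == k)) := by
  induction l generalizing d with
  | nil => cases hd : d.get? k <;> simp [hd]
  | cons w t ih =>
    rw [List.foldl_cons, ih]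
    by_cases h : f w = k
    · subst h
      rw [PySem.Dict.get?_setdefault_self, List.find?_cons_of_pos (by simp)]
      cases d.get? (f w) <;> rfl
    · rw [PySem.Dict.get?_setdefault_of_ne _ _ (Ne.symm h),
          List.find?_cons_of_neg (by simp [h])]

theorem contains_ofList_eq_any (wl : List String) (q : String) :
    PySem.Set.contains (PySem.Set.ofList wl) q = wl.any (fun w => w == q) := by
  simp only [PySem.Set.contains, List.any_beq']
  by_cases h : q ∈ wl
  · have h2 := (PySem.Set.mem_ofList wl q).mpr h
    simp [h2, h]
  · have h2 : q ∉ PySem.Set.ofList wl := fun hc => h ((PySem.Set.mem_ofList wl q).mp hc)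
    simp [h2, h]

-- ===== VERDICT (by name: the statement is the Claim_ definition above) =====
theorem vowel_spellchecker_spec : Claim_equal_vowel_spellchecker := by
  intro word_list queries _
  unfold Spec_vowel_spellchecker vowel_spellchecker vowel_spellchecker_alt
  rw [foldl_prod_split (fun d w => PySem.Dict.setdefault d (PySem.Str.lower w) w)
        (fun d w => PySem.Dict.setdefault d (deVowel (PySem.Str.lower w)) w)
        word_list PySem.Dict.empty PySem.Dict.empty]
  apply List.map_congr_left
  intro q _
  rw [contains_ofList_eq_any]
  by_cases hq : word_list.any (fun w => w == q)
  · simp [hq]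
  · simp only [hq, if_neg, Bool.false_eq_true, not_false_eq_true]
    rw [get?_foldl_setdefault (fun w => PySem.Str.lower w)]
    simp only [PySem.Dict.getD]
    rw [get?_foldl_setdefault (fun w => deVowel (PySem.Str.lower w))]
    simp [PySem.Dict.get?_empty]
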